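-- pv_equiv track=rewrite | github.com/libnano/libnano | libnano/datasets/build_enzyme_dataset.py | seq_to_regex
-- ===== SOURCE A (Python) =====
-- from typing import (  # Union,
--     Any,
--     Dict,
--     List,
--     NamedTuple,
--     Optional,
--     Tuple,
-- )
--
-- REGEX_BASE_LUT: Dict[str, str] = {
--     'A': 'A',
--     'C': 'C',
--     'G': 'G',
--     'T': 'T',
--     'R': '[AG]',    # purine
--     'Y': '[CG]',    # pyrimidine
--     'K': '[GT]',    # keto
--     'M': '[AC]',    # amino
--     'S': '[GC]',    # strong bonds
--     'W': '[AT]',    # weak bonds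
--     'B': '[GTC]',   # all but A
--     'D': '[GAT]',   # all but C
--     'H': '[ACT]',   # all but G
--     'V': '[GCA]',   # all but T
--     'N': 'N',       # leave N's put
-- }
--
-- def seq_to_regex(
--         seq: str,
-- ) -> str:
--     '''Convert sequence to regex
--
--     Args:
--         seq: Sequence to Convert
--
--     Returns:
--         Regex expression to match the sequence against
--     '''
--     if seq is None:
--         return None
--     regex_str = ''
--     prev_b = ''
--     num_n = 0
--     for b in seq:
--         if prev_b == 'N' and b != 'N':
--             regex_str += '[ATGC]{%d}' % num_n
--             regex_str += REGEX_BASE_LUT[b]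
--             num_n = 0
--         elif b == 'N':
--             num_n += 1
--         else:
--             regex_str += REGEX_BASE_LUT[b]
--             pass
--         prev_b = b
--     if prev_b == 'N':
--         regex_str += '[ATGC]{%d}' % num_n
--     return regex_str
-- ===== SOURCE B (Python) =====
-- # B: split-on-N decomposition instead of a per-character state machine.
-- REGEX_BASE_LUT = {
--     'A': 'A', 'C': 'C', 'G': 'G', 'T': 'T',
--     'R': '[AG]', 'Y': '[CG]', 'K': '[GT]', 'M': '[AC]',
--     'S': '[GC]', 'W': '[AT]', 'B': '[GTC]', 'D': '[GAT]',
--     'H': '[ACT]', 'V': '[GCA]', 'N': 'N',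
-- }
--
-- def seq_to_regex(seq):
--     if seq is None:
--         return None
--     chunks = []
--     run = 0
--     for i, part in enumerate(seq.split('N')):
--         if i > 0:
--             run += 1
--         if part:
--             if run:
--                 chunks.append('[ATGC]{%d}' % run)
--                 run = 0
--             chunks.append(''.join(REGEX_BASE_LUT[b] for b in part))
--     if run:
--         chunks.append('[ATGC]{%d}' % run)
--     return ''.join(chunks)
-- ===== Notes on version B (the rewrite author's own statement) =====
-- stated objective: alternative
-- what changed: Replaces A's per-character prev/counter state machine by a split-then-join decomposition: split the sequence at the wildcard base, translate each unambiguous piece via the lookup table, and rejoin the pieces with one bounded-length block per run of separators.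
import Mathlib
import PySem

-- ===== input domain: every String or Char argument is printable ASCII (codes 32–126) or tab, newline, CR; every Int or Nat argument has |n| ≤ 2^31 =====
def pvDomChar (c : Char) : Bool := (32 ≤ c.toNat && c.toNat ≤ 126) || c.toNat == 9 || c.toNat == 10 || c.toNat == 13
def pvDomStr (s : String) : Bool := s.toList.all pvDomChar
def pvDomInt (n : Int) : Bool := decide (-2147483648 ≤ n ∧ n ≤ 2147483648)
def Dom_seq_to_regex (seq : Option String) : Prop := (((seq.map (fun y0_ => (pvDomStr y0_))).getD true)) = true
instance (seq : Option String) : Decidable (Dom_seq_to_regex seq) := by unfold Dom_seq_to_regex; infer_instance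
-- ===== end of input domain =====

-- B replaces A's per-character prev_b/num_n state machine by a split-on-'N'
-- decomposition (translate the N-free pieces, emit one block per separator run);
-- equal return values on Pre_ (A mutates nothing).

-- ===== PORT A =====
-- REGEX_BASE_LUT; keys are the 1-char strings of the Python dict, modelled as Char;
-- values as char lists (strings are handled as char lists throughout, exact for ASCII).
def pvLUT : PySem.Dict Char (List Char) := PySem.Dict.ofList
  [('A', ['A']), ('C', ['C']), ('G', ['G']), ('T', ['T']),
   ('R', ['[','A','G',']']), ('Y', ['[','C','G',']']), ('K', ['[','G','T',']']),
   ('M', ['[','A','C',']']), ('S', ['[','G','C',']']), ('W', ['[','A','T',']']),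
   ('B', ['[','G','T','C',']']), ('D', ['[','G','A','T',']']),
   ('H', ['[','A','C','T',']']), ('V', ['[','G','C','A',']']), ('N', ['N'])]

-- '[ATGC]{%d}' % n
def pvNBlock (n : Int) : List Char :=
  ['[','A','T','G','C',']','{'] ++ (PySem.Int.toStr n).toList ++ ['}']

-- one iteration of A's for-loop; state = (regex_str, prev_b, num_n), none = KeyError raised
def pvStepA (st : Option (List Char × Option Char × Int)) (b : Char) :
    Option (List Char × Option Char × Int) :=
  match st with
  | none => none
  | some (regex, prev, numn) =>
    if prev = some 'N' ∧ b ≠ 'N' then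
      match pvLUT.get? b with
      | none => none
      | some t => some (regex ++ pvNBlock numn ++ t, some b, 0)
    else if b = 'N' then some (regex, some b, numn + 1)
    else
      match pvLUT.get? b with
      | none => none
      | some t => some (regex ++ t, some b, numn)

-- the trailing 'if prev_b == N' and the return
def pvFinishA (st : Option (List Char × Option Char × Int)) : Option (List Char) :=
  match st with
  | none => none
  | some (regex, prev, numn) =>
    if prev = some 'N' then some (regex ++ pvNBlock numn) else some regex

def seq_to_regex (seq : Option String) : Option String :=
  match seq with
  | none => none
  | some s =>
    (pvFinishA (s.toList.foldl pvStepA (some ([], none, 0)))).map String.ofList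

-- ===== PORT B =====
-- ''.join(REGEX_BASE_LUT[b] for b in part); none = KeyError
def pvTransPart (p : List Char) : Option (List Char) :=
  p.foldl
    (fun acc b =>
      match acc with
      | none => none
      | some a =>
        match pvLUT.get? b with
        | none => none
        | some t => some (a ++ t))
    (some [])

-- one iteration of B's for-loop over enumerate(...); inc = (i > 0); state = (chunks, run)
def pvStepB (inc : Bool) (st : Option (List (List Char) × Int)) (p : List Char) :
    Option (List (List Char) × Int) :=
  match st with
  | none => none
  | some (chunks, run) =>
    let run := if inc then run + 1 else run
    if p = [] then some (chunks, run)
    else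
      let cr : List (List Char) × Int :=
        if run ≠ 0 then (chunks ++ [pvNBlock run], 0) else (chunks, run)
      match pvTransPart p with
      | none => none
      | some t => some (cr.1 ++ [t], cr.2)

def seq_to_regex_alt (seq : Option String) : Option String :=
  match seq with
  | none => none
  | some s =>
    let parts := PySem.Chars.splitOn s.toList ['N']
    match (PySem.List.enumerate parts 0).foldl
        (fun st ip => pvStepB (decide (0 < ip.1)) st ip.2) (some ([], 0)) with
    | none => none
    | some (chunks, run) =>
      some (String.ofList (PySem.Chars.join []
        (if run ≠ 0 then chunks ++ [pvNBlock run] else chunks)))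

-- ===== PRECONDITION & SPEC =====
def pvKeys : List Char := ['A','C','G','T','R','Y','K','M','S','W','B','D','H','V','N']

-- Pre_ excludes exactly the inputs on which A raises KeyError: a sequence
-- containing a character that is not a REGEX_BASE_LUT key (B raises there too).
def Pre_seq_to_regex (seq : Option String) : Prop :=
  ((seq.map (fun s => s.toList.all (fun c => decide (c ∈ pvKeys)))).getD true) = true
instance (seq : Option String) : Decidable (Pre_seq_to_regex seq) := by
  unfold Pre_seq_to_regex; infer_instance

def pvWitness_seq_to_regex : Option String := some "ANNCA"

def Spec_seq_to_regex (seq : Option String) (out : Option String) : Prop := out = seq_to_regex_alt seq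
instance (seq : Option String) (out : Option String) : Decidable (Spec_seq_to_regex seq out) := by
  unfold Spec_seq_to_regex; infer_instance

-- ===== CLAIM (what is proved, stated in full; the proofs are below) =====
def Claim_equal_seq_to_regex : Prop := ∀ (seq : Option String), Dom_seq_to_regex seq → Pre_seq_to_regex seq → Spec_seq_to_regex seq (seq_to_regex seq)

-- ===== LEMMAS AND PROOFS =====

-- total lookup used by the proof-side canonical form
def pvLutD (c : Char) : List Char := (pvLUT.get? c).getD []

theorem pvLut_some {c : Char} (h : c ∈ pvKeys) : pvLUT.get? c = some (pvLutD c) := by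
  fin_cases h <;> rfl

-- canonical result on valid sequences: run-structured recursion
def pvCanon : List Char → List Char
  | [] => []
  | c :: cs =>
    if c = 'N' then
      pvNBlock (1 + (cs.takeWhile (· == 'N')).length) ++ pvCanon (cs.dropWhile (· == 'N'))
    else pvLutD c ++ pvCanon cs
termination_by cs => cs.length
decreasing_by
  · exact Nat.lt_succ_of_le (List.length_dropWhile_le _ _)
  · simp

def pvG (n : Int) (cs : List Char) : List Char :=
  pvNBlock (n + (cs.takeWhile (· == 'N')).length) ++ pvCanon (cs.dropWhile (· == 'N'))

theorem pvG_cons_N (n : Int) (cs : List Char) : pvG n ('N' :: cs) = pvG (n + 1) cs := by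
  simp only [pvG, List.takeWhile_cons, List.dropWhile_cons]
  norm_num
  congr 1
  have h : n + (((List.takeWhile (fun x => x == 'N') cs).length : ℤ) + 1) =
      n + 1 + ((List.takeWhile (fun x => x == 'N') cs).length : ℤ) := by ring
  rw [h]

theorem pvCanon_cons_N (cs : List Char) : pvCanon ('N' :: cs) = pvG 1 cs := by
  rw [pvCanon]
  simp only [if_true, pvG]

theorem pvA_fold (cs : List Char) : ∀ (r : List Char) (prev : Option Char) (n : Int),
    (∀ c ∈ cs, c ∈ pvKeys) → (prev = some 'N' ∨ n = 0) →
    pvFinishA (cs.foldl pvStepA (some (r, prev, n))) =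
      some (if prev = some 'N' then r ++ pvG n cs else r ++ pvCanon cs) := by
  induction cs with
  | nil =>
    intro r prev n _ hpn
    by_cases hN : prev = some 'N'
    · simp [hN, pvFinishA, pvG, pvCanon]
    · rcases hpn with hpn | hpn
      · exact absurd hpn hN
      · simp [hN, pvFinishA, pvCanon]
  | cons c cs ih =>
    intro r prev n hv hpn
    have hc : c ∈ pvKeys := hv c List.mem_cons_self
    have hv' : ∀ a ∈ cs, a ∈ pvKeys := fun a ha => hv a (List.mem_cons_of_mem _ ha)
    simp only [List.foldl_cons]
    by_cases hcN : c = 'N'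
    · subst hcN
      have hstep : pvStepA (some (r, prev, n)) 'N' = some (r, some 'N', n + 1) := by
        simp [pvStepA]
      rw [hstep, ih r (some 'N') (n + 1) hv' (Or.inl rfl)]
      by_cases hN : prev = some 'N'
      · simp [hN, pvG_cons_N]
      · rcases hpn with hpn | hpn
        · exact absurd hpn hN
        · subst hpn
          simp only [if_neg hN, pvCanon_cons_N]
          norm_num
    · by_cases hN : prev = some 'N'
      · have hstep : pvStepA (some (r, prev, n)) c =
            some (r ++ pvNBlock n ++ pvLutD c, some c, 0) := by
          simp [pvStepA, hN, hcN, pvLut_some hc]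
        rw [hstep, ih _ (some c) 0 hv' (Or.inr rfl)]
        have : ¬ (some c = some 'N') := by simp [hcN]
        simp only [hN, if_neg this]
        congr 1
        rw [pvG]
        have hb : (c == 'N') = false := by simp [hcN]
        have ht : List.takeWhile (· == 'N') (c :: cs) = [] := by
          simp [hb]
        have hd : List.dropWhile (· == 'N') (c :: cs) = c :: cs := by
          simp [hb]
        rw [ht, hd, pvCanon]
        simp [hcN, List.append_assoc]
      · rcases hpn with hpn | hpn
        · exact absurd hpn hN
        · subst hpn
          have hstep : pvStepA (some (r, prev, 0)) c = some (r ++ pvLutD c, some c, 0) := by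
            simp [pvStepA, hN, hcN, pvLut_some hc]
          rw [hstep, ih _ (some c) 0 hv' (Or.inr rfl)]
          have : ¬ (some c = some 'N') := by simp [hcN]
          simp only [if_neg hN, if_neg this]
          rw [pvCanon]
          simp [hcN, List.append_assoc]

-- proof-side simple recursion computing s.split('N')
def pvSplitN : List Char → List (List Char)
  | [] => [[]]
  | c :: cs => if c = 'N' then [] :: pvSplitN cs else (pvSplitN cs).modifyHead (c :: ·)

theorem pvSplitN_ne_nil (cs : List Char) : pvSplitN cs ≠ [] := by
  induction cs with
  | nil => simp [pvSplitN]
  | cons c cs ih =>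
    simp only [pvSplitN]
    split
    · simp
    · cases h : pvSplitN cs with
      | nil => exact absurd h ih
      | cons a l => simp [List.modifyHead]

theorem pvGo_eq : ∀ (l : List Char) (fuel : Nat) (cur : List Char) (acc : List (List Char)),
    l.length < fuel →
    PySem.Chars.splitOn.go ['N'] fuel l cur acc =
      acc.reverse ++ (pvSplitN l).modifyHead (cur.reverse ++ ·) := by
  intro l
  induction l with
  | nil =>
    intro fuel cur acc h
    match fuel, h with
    | fuel + 1, _ => simp [PySem.Chars.splitOn.go, pvSplitN, List.modifyHead]
  | cons c rest ih =>
    intro fuel cur acc h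
    match fuel, h with
    | fuel + 1, h =>
      rw [PySem.Chars.splitOn.go]
      by_cases hc : c = 'N'
      · have hpre : List.isPrefixOf ['N'] (c :: rest) = true := by
          simp [List.isPrefixOf, hc]
        rw [if_pos hpre]
        simp only [List.length_singleton, List.drop_succ_cons, List.drop_zero]
        rw [ih fuel [] _ (Nat.lt_of_succ_lt_succ h)]
        simp [pvSplitN, hc]
        cases hsp : pvSplitN rest <;> simp [List.modifyHead]
      · have hpre : ¬ (List.isPrefixOf ['N'] (c :: rest) = true) := by
          simp [List.isPrefixOf]
          exact fun h => hc h.symm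
        rw [if_neg hpre]
        rw [ih fuel (c :: cur) acc (Nat.lt_of_succ_lt_succ h)]
        simp [pvSplitN, hc]
        cases hsp : pvSplitN rest <;> simp [List.modifyHead]

theorem pvSplitOn_eq (cs : List Char) : PySem.Chars.splitOn cs ['N'] = pvSplitN cs := by
  rw [PySem.Chars.splitOn, pvGo_eq cs (cs.length + 1) [] [] (Nat.lt_succ_self _)]
  cases h : pvSplitN cs <;> simp [List.modifyHead]

theorem pvMem_splitN_aux : ∀ (cs p : List Char), p ∈ pvSplitN cs → ∀ a ∈ p, a ∈ cs := by
  intro cs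
  induction cs with
  | nil => intro p hp a ha; simp [pvSplitN] at hp; subst hp; simp at ha
  | cons c cs ih =>
    intro p hp a ha
    simp only [pvSplitN] at hp
    split at hp
    · rw [List.mem_cons] at hp
      rcases hp with hp | hp
      · subst hp; simp at ha
      · exact List.mem_cons_of_mem _ (ih p hp a ha)
    · cases h : pvSplitN cs with
      | nil => exact absurd h (pvSplitN_ne_nil cs)
      | cons q l =>
        rw [h] at hp
        simp only [List.modifyHead] at hp
        rw [List.mem_cons] at hp
        rcases hp with hp | hp
        · subst hp
          rw [List.mem_cons] at ha
          rcases ha with ha | ha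
          · subst ha; simp
          · exact List.mem_cons_of_mem _
              (ih q (by rw [h]; exact List.mem_cons_self) a (by assumption))
        · exact List.mem_cons_of_mem _ (ih p (by rw [h]; exact List.mem_cons_of_mem _ hp) a ha)

theorem pvMem_splitN {cs : List Char} {p : List Char} (hp : p ∈ pvSplitN cs)
    {a : Char} (ha : a ∈ p) : a ∈ cs := pvMem_splitN_aux cs p hp a ha

def pvTransT (p : List Char) : List Char := (p.map pvLutD).flatten

theorem pvTrans_some {p : List Char} (h : ∀ c ∈ p, c ∈ pvKeys) :
    pvTransPart p = some (pvTransT p) := by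
  have key : ∀ (q : List Char) (a : List Char), (∀ c ∈ q, c ∈ pvKeys) →
      q.foldl (fun acc b =>
        match acc with
        | none => none
        | some a =>
          match pvLUT.get? b with
          | none => none
          | some t => some (a ++ t)) (some a) = some (a ++ pvTransT q) := by
    intro q
    induction q with
    | nil => intro a _; simp [pvTransT]
    | cons c q ih =>
      intro a h
      simp only [List.foldl_cons, pvLut_some (h c List.mem_cons_self)]
      rw [ih _ (fun x hx => h x (List.mem_cons_of_mem _ hx))]
      simp [pvTransT]
  simpa using key p [] h

-- pure version of B's loop over the parts after the first (inc = true on every part)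
def pvEmitT : Int → List (List Char) → (List (List Char) × Int)
  | run, [] => ([], run)
  | run, p :: ps =>
    if p = [] then pvEmitT (run + 1) ps
    else ((if run + 1 ≠ 0 then [pvNBlock (run + 1)] else []) ++ [pvTransT p] ++ (pvEmitT 0 ps).1,
          (pvEmitT 0 ps).2)

theorem pvFoldB_emit (ps : List (List Char)) : ∀ (chunks : List (List Char)) (run : Int),
    (∀ p ∈ ps, ∀ c ∈ p, c ∈ pvKeys) →
    ps.foldl (pvStepB true) (some (chunks, run)) =
      some (chunks ++ (pvEmitT run ps).1, (pvEmitT run ps).2) := by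
  induction ps with
  | nil => intro chunks run _; simp [pvEmitT]
  | cons p ps ih =>
    intro chunks run h
    simp only [List.foldl_cons, pvStepB, pvEmitT, if_true]
    by_cases hp : p = []
    · rw [if_pos hp, if_pos hp]
      exact ih chunks (run + 1) (fun q hq => h q (List.mem_cons_of_mem _ hq))
    · rw [if_neg hp, if_neg hp]
      rw [pvTrans_some (h p List.mem_cons_self)]
      by_cases hr : run + 1 ≠ 0
      · rw [if_pos hr, if_pos hr]
        simp only
        rw [ih _ 0 (fun q hq => h q (List.mem_cons_of_mem _ hq))]
        simp
      · rw [if_neg hr, if_neg hr]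
        simp only
        rw [ih _ (run + 1) (fun q hq => h q (List.mem_cons_of_mem _ hq))]
        simp at hr
        simp [hr]

theorem pvEnumFold (ps : List (List Char)) :
    ∀ (i : Int), 1 ≤ i → ∀ (st : Option (List (List Char) × Int)),
    (PySem.List.enumerate ps i).foldl (fun st ip => pvStepB (decide (0 < ip.1)) st ip.2) st =
      ps.foldl (pvStepB true) st := by
  induction ps with
  | nil => intro i _ st; simp [PySem.List.enumerate]
  | cons p ps ih =>
    intro i hi st
    rw [PySem.List.enumerate_cons]
    simp only [List.foldl_cons]
    rw [ih (i + 1) (by omega)]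
    have : decide (0 < i) = true := by simp; omega
    rw [this]

def pvFinFlat (e : List (List Char) × Int) : List Char :=
  e.1.flatten ++ (if e.2 ≠ 0 then pvNBlock e.2 else [])

-- joint run-structure lemma: P (head part carries no separator) and Q (every part preceded by one 'N')
theorem pvTransT_cons (c : Char) (p : List Char) :
    pvTransT (c :: p) = pvLutD c ++ pvTransT p := by
  simp [pvTransT]

theorem pvCanon_cons_ne (c : Char) (cs : List Char) (hc : ¬ c = 'N') :
    pvCanon (c :: cs) = pvLutD c ++ pvCanon cs := by
  rw [pvCanon, if_neg hc]

theorem pvG_cons_ne (n : Int) (c : Char) (cs : List Char) (hc : ¬ c = 'N') :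
    pvG n (c :: cs) = pvNBlock n ++ pvCanon (c :: cs) := by
  have hb : (c == 'N') = false := by simp [hc]
  simp [pvG, hb, pvCanon_cons_ne c cs hc]

theorem pvEmit_canon : ∀ (fuel : Nat) (cs : List Char), cs.length ≤ fuel → (∀ c ∈ cs, c ∈ pvKeys) →
    (pvTransT ((pvSplitN cs).headI) ++ pvFinFlat (pvEmitT 0 ((pvSplitN cs).tail)) = pvCanon cs) ∧
    (∀ run : Int, 0 ≤ run → pvFinFlat (pvEmitT run (pvSplitN cs)) = pvG (run + 1) cs) := by
  have base : ∀ fuel : Nat,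
      ((List.nil (α := Char)).length ≤ fuel → (∀ c ∈ ([] : List Char), c ∈ pvKeys) →
      (pvTransT ((pvSplitN []).headI) ++ pvFinFlat (pvEmitT 0 ((pvSplitN []).tail)) = pvCanon []) ∧
      (∀ run : Int, 0 ≤ run → pvFinFlat (pvEmitT run (pvSplitN [])) = pvG (run + 1) [])) := by
    intro _ _ _
    constructor
    · simp [pvSplitN, pvTransT, pvEmitT, pvFinFlat, pvCanon]
    · intro run hrun
      have h1 : run + 1 ≠ 0 := by omega
      simp [pvSplitN, pvEmitT, pvFinFlat, h1, pvG, pvCanon]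
  intro fuel
  induction fuel with
  | zero =>
    intro cs hlen hv
    have : cs = [] := List.length_eq_zero_iff.mp (Nat.le_zero.mp hlen)
    subst this
    exact base 0 hlen hv
  | succ fuel ih =>
    intro cs hlen hv
    cases cs with
    | nil => exact base (fuel + 1) hlen hv
    | cons c cs' =>
      have hlen' : cs'.length ≤ fuel := by simpa using Nat.succ_le_succ_iff.mp (by simpa using hlen)
      have hv' : ∀ a ∈ cs', a ∈ pvKeys := fun a ha => hv a (List.mem_cons_of_mem _ ha)
      obtain ⟨P', Q'⟩ := ih cs' hlen' hv'
      by_cases hc : c = 'N'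
      · subst hc
        have hsp : pvSplitN ('N' :: cs') = [] :: pvSplitN cs' := by simp [pvSplitN]
        constructor
        · rw [hsp]
          simp only [List.headI, List.tail]
          rw [Q' 0 le_rfl]
          simp [pvTransT, pvCanon_cons_N]
        · intro run hrun
          rw [hsp]
          have he : pvEmitT run ([] :: pvSplitN cs') = pvEmitT (run + 1) (pvSplitN cs') := by
            rw [pvEmitT]
            simp
          rw [he, Q' (run + 1) (by omega), pvG_cons_N]
      · cases h0 : pvSplitN cs' with
        | nil => exact absurd h0 (pvSplitN_ne_nil cs')
        | cons p0 tl =>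
          have hsp : pvSplitN (c :: cs') = (c :: p0) :: tl := by
            simp [pvSplitN, hc, h0, List.modifyHead]
          rw [h0] at P'
          simp only [List.headI, List.tail] at P'
          constructor
          · rw [hsp]
            simp only [List.headI, List.tail]
            rw [pvTransT_cons, List.append_assoc, P', pvCanon_cons_ne c cs' hc]
          · intro run hrun
            rw [hsp]
            have h1 : run + 1 ≠ 0 := by omega
            rw [pvEmitT]
            simp only [if_neg (by simp : ¬ (c :: p0 = [])), if_pos h1]
            rw [pvG_cons_ne (run + 1) c cs' hc]
            simp only [pvFinFlat, List.flatten_cons, List.flatten_append, List.flatten_cons]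
            simp only [List.append_assoc, List.flatten_nil, List.append_nil]
            congr 1
            rw [pvCanon_cons_ne c cs' hc, pvTransT_cons, List.append_assoc, ← P']
            simp [pvFinFlat]

theorem pvJoin_nil : ∀ (l : List (List Char)), PySem.Chars.join [] l = l.flatten := by
  intro l
  induction l with
  | nil => rfl
  | cons x l ih =>
    cases l with
    | nil => simp [PySem.Chars.join, List.intercalate]
    | cons y l' =>
      simp only [PySem.Chars.join, List.intercalate] at ih ⊢
      simp [List.intersperse] at ih ⊢
      exact ih

-- ===== VERDICT (by name: the statement is the Claim_ definition above) =====
theorem seq_to_regex_spec : Claim_equal_seq_to_regex := by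
  intro seq _ hpre
  unfold Spec_seq_to_regex
  cases seq with
  | none => rfl
  | some s =>
    have hv : ∀ c ∈ s.toList, c ∈ pvKeys := by
      intro c hc
      simp only [Pre_seq_to_regex, Option.map_some, Option.getD_some, List.all_eq_true] at hpre
      simpa using hpre c hc
    -- A's side
    have hA : seq_to_regex (some s) = some (String.ofList (pvCanon s.toList)) := by
      simp only [seq_to_regex]
      rw [pvA_fold s.toList [] none 0 hv (Or.inr rfl)]
      simp
    -- B's side
    rw [hA]
    simp only [seq_to_regex_alt]
    rw [pvSplitOn_eq]
    cases hsp : pvSplitN s.toList with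
    | nil => exact absurd hsp (pvSplitN_ne_nil _)
    | cons p0 tl =>
      have hmem : ∀ p ∈ p0 :: tl, ∀ c ∈ p, c ∈ pvKeys := by
        intro p hp c hc
        exact hv c (pvMem_splitN (by rw [hsp]; exact hp) hc)
      have hvtl : ∀ p ∈ tl, ∀ c ∈ p, c ∈ pvKeys :=
        fun p hp => hmem p (List.mem_cons_of_mem _ hp)
      rw [PySem.List.enumerate_cons]
      simp only [List.foldl_cons]
      rw [pvEnumFold tl (0 + 1) (by omega)]
      have hstep0 : pvStepB (decide (0 < (0 : Int))) (some ([], 0)) p0 =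
          some ((if p0 = [] then [] else [pvTransT p0]), 0) := by
        have : (decide (0 < (0 : Int))) = false := by decide
        rw [this]
        by_cases hp0 : p0 = []
        · simp [pvStepB, hp0]
        · simp only [pvStepB, if_neg hp0]
          rw [pvTrans_some (hmem p0 List.mem_cons_self)]
          simp
      rw [hstep0, pvFoldB_emit tl _ 0 hvtl]
      obtain ⟨P, _⟩ := pvEmit_canon s.toList.length s.toList le_rfl hv
      rw [hsp] at P
      simp only [List.headI, List.tail] at P
      have hfin : ∀ (chunks : List (List Char)) (r : Int),
          PySem.Chars.join [] (if r ≠ 0 then chunks ++ [pvNBlock r] else chunks) =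
            chunks.flatten ++ (if r ≠ 0 then pvNBlock r else []) := by
        intro chunks r
        split_ifs with h <;> simp [pvJoin_nil]
      simp only [hfin]
      congr 1
      rw [← P]
      by_cases hp0 : p0 = [] <;> simp [hp0, pvTransT, pvFinFlat, List.append_assoc]
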